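-- pv_equiv track=rewrite | github.com/sigridjineth/anamnesis | anamnesis/flex_projection.py | _delegation_depth
-- ===== SOURCE A (Python) =====
-- def _delegation_depth(root: str, outgoing: dict[str, set[str]]) -> int:
--     max_depth = 0
--     stack: list[tuple[str, int]] = [(root, 0)]
--     seen: set[str] = set()
--     while stack:
--         node, depth = stack.pop()
--         if node in seen:
--             continue
--         seen.add(node)
--         max_depth = max(max_depth, depth)
--         for child in outgoing.get(node, set()):
--             stack.append((child, depth + 1))
--     return max_depth
-- ===== SOURCE B (Python) =====
-- def _next(frames: list[tuple[list[str], int]]):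
--     """Pop the next pending (node, depth) from the frame stack, dropping exhausted frames."""
--     while frames:
--         children, depth = frames[-1]
--         if children:
--             return children.pop(), depth
--         frames.pop()
--     return None
--
--
-- def _delegation_depth(root: str, outgoing: dict[str, set[str]]) -> int:
--     max_depth = 0
--     seen: set[str] = set()
--     frames: list[tuple[list[str], int]] = [([root], 0)]
--     while True:
--         nxt = _next(frames)
--         if nxt is None:
--             return max_depth
--         node, depth = nxt
--         if node in seen:
--             continue
--         seen.add(node)
--         if depth > max_depth:
--             max_depth = depth
--         frames.append((list(outgoing.get(node, set())), depth + 1))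
-- ===== Notes on version B (the rewrite author's own statement) =====
-- stated objective: alternative
-- what changed: Replaces A's flat LIFO stack of (node, depth) pairs (children pushed individually, seen checked at pop) by an iterator-stack DFS: a stack of (remaining-children, depth) frames from which one child is popped per iteration, exhausted frames being dropped; same visit order, different stack data structure.
import Mathlib
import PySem

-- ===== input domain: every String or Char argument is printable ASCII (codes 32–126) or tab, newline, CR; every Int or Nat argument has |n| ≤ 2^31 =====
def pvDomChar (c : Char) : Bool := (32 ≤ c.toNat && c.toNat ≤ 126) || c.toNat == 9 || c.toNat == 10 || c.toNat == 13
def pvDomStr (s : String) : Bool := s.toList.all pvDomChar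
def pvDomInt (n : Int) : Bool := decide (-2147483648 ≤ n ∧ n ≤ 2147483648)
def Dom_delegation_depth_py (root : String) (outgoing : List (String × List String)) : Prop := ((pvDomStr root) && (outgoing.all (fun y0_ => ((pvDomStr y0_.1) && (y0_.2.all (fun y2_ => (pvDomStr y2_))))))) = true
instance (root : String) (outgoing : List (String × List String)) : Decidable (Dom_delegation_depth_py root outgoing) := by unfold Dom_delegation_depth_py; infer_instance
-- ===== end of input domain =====

-- B replaces A's flat LIFO stack of (node, depth) pairs by an iterator-stack DFS:
-- a stack of (remaining-children, depth) frames, popping one child at a time from the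
-- top frame; same asymptotic cost, different data structure (objective: alternative).

-- Both loop ports use fuel bounding the number of node pops (1 for the root + one per
-- edge in the adjacency list), so the fuel never runs out on any actual input.
def pvFuel (outgoing : List (String × List String)) : Nat :=
  1 + outgoing.foldl (fun a p => a + p.2.length) 0

-- ===== PORT A =====
-- A's while loop: pop (node, depth) off the stack (head = top), skip if seen,
-- else mark, take max, and push every child with depth+1.
def pvLoopA (fuel : Nat) (seen : PySem.Set String) (stack : List (String × Int))
    (max_depth : Int) (outgoing : List (String × List String)) : Option Int :=
  match fuel, stack with
  | _, [] => some max_depth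
  | 0, _ :: _ => none
  | Nat.succ g, (node, depth) :: rest =>
    if PySem.Set.contains seen node then
      pvLoopA g seen rest max_depth outgoing
    else
      pvLoopA g (PySem.Set.add seen node)
        (((PySem.Dict.mk outgoing).getD node []).foldl (fun st c => (c, depth + 1) :: st) rest)
        (max max_depth depth) outgoing

def delegation_depth_py (root : String) (outgoing : List (String × List String)) : Int :=
  match pvLoopA (pvFuel outgoing) PySem.Set.empty [(root, 0)] 0 outgoing with
  | some m => m
  | none => 0

-- ===== PORT B =====
-- B's _next helper: scan the frame stack (list head = frames[-1]), dropping
-- exhausted frames, until a frame yields its last child (children.pop() =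
-- getLast?/dropLast); none when every frame is exhausted.
def pvNext : List (List String × Int) → Option ((String × Int) × List (List String × Int))
  | [] => none
  | (children, depth) :: rest =>
    match children.getLast? with
    | none => pvNext rest
    | some node => some ((node, depth), (children.dropLast, depth) :: rest)

-- B's main while-True loop: take the next pending node via pvNext, return when
-- exhausted, skip if seen, else mark, bump max if larger, push the child frame.
-- Fuel is consumed once per node taken, matching A's per-pop fuel.
def pvLoopB (fuel : Nat) (seen : PySem.Set String)
    (frames : List (List String × Int)) (max_depth : Int)
    (outgoing : List (String × List String)) : Option Int :=
  match pvNext frames with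
  | none => some max_depth
  | some ((node, depth), frames') =>
    match fuel with
    | 0 => none
    | Nat.succ g =>
      if PySem.Set.contains seen node then
        pvLoopB g seen frames' max_depth outgoing
      else
        pvLoopB g (PySem.Set.add seen node)
          (((PySem.Dict.mk outgoing).getD node [], depth + 1) :: frames')
          (if depth > max_depth then depth else max_depth) outgoing

def delegation_depth_py_alt (root : String) (outgoing : List (String × List String)) : Int :=
  match pvLoopB (pvFuel outgoing) PySem.Set.empty [([root], 0)] 0 outgoing with
  | some m => m
  | none => 0

-- ===== PRECONDITION & SPEC =====
def Spec_delegation_depth_py (root : String) (outgoing : List (String × List String)) (out : Int) : Prop := out = delegation_depth_py_alt root outgoing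
instance (root : String) (outgoing : List (String × List String)) (out : Int) : Decidable (Spec_delegation_depth_py root outgoing out) := by unfold Spec_delegation_depth_py; infer_instance

-- ===== CLAIM (what is proved, stated in full; the proofs are below) =====
def Claim_equal_delegation_depth_py : Prop := ∀ (root : String) (outgoing : List (String × List String)), Dom_delegation_depth_py root outgoing → Spec_delegation_depth_py root outgoing (delegation_depth_py root outgoing)

-- ===== LEMMAS AND PROOFS =====

-- a frame (cs, d) stands for the flat-stack segment cs.reverse.map (·, d)
def pvFlatten (frames : List (List String × Int)) : List (String × Int) :=
  frames.flatMap (fun f => f.1.reverse.map (fun c => (c, f.2)))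

-- pushing children onto the flat stack one by one = prepending them reversed
theorem pvFoldl_push (cs : List String) (d : Int) (rest : List (String × Int)) :
    cs.foldl (fun st c => (c, d) :: st) rest
      = cs.reverse.map (fun c => (c, d)) ++ rest := by
  induction cs generalizing rest with
  | nil => rfl
  | cons c cs ih => simp [List.foldl_cons, ih]

-- pvNext takes exactly the head of the flattened stack
theorem pvNext_flatten (frames : List (List String × Int)) :
    pvFlatten frames
      = match pvNext frames with
        | none => []
        | some ((node, depth), frames') => (node, depth) :: pvFlatten frames' := by
  induction frames with
  | nil => simp [pvNext, pvFlatten]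
  | cons fr rest ih =>
    obtain ⟨children, depth⟩ := fr
    rw [pvNext]
    cases hlast : children.getLast? with
    | none =>
      have hnil : children = [] := List.getLast?_eq_none_iff.mp hlast
      subst hnil
      simpa [pvFlatten] using ih
    | some node =>
      obtain ⟨init, rfl⟩ := List.getLast?_eq_some_iff.mp hlast
      simp [pvFlatten]

-- THE SIMULATION LEMMA: B's frame loop computes exactly A's flat loop on the
-- flattened stack, with identical fuel consumption.
theorem pvSim (fuel : Nat) :
    ∀ (frames : List (List String × Int)) (seen : PySem.Set String) (m : Int)
      (outgoing : List (String × List String)),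
      pvLoopB fuel seen frames m outgoing
        = pvLoopA fuel seen (pvFlatten frames) m outgoing := by
  induction fuel with
  | zero =>
    intro frames seen m out
    rw [pvLoopB, pvNext_flatten frames]
    cases hn : pvNext frames with
    | none => simp [pvLoopA]
    | some p =>
      obtain ⟨⟨node, depth⟩, frames'⟩ := p
      simp [pvLoopA]
  | succ g ih =>
    intro frames seen m out
    rw [pvLoopB, pvNext_flatten frames]
    cases hn : pvNext frames with
    | none => simp [pvLoopA]
    | some p =>
      obtain ⟨⟨node, depth⟩, frames'⟩ := p
      simp only
      rw [pvLoopA]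
      by_cases hc : PySem.Set.contains seen node = true
      · rw [if_pos hc, if_pos hc, ih]
      · rw [if_neg hc, if_neg hc, ih, pvFoldl_push]
        have hmax : (if depth > m then depth else m) = max m depth := by
          split_ifs with h <;> omega
        rw [hmax]
        simp [pvFlatten]

-- ===== VERDICT (by name: the statement is the Claim_ definition above) =====
theorem delegation_depth_py_spec : Claim_equal_delegation_depth_py := by
  intro root outgoing _
  unfold Spec_delegation_depth_py delegation_depth_py delegation_depth_py_alt
  rw [pvSim]
  simp [pvFlatten]
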